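-- pv_equiv track=rewrite | github.com/tmgsr02/macrobasev | macrobase_py/explainers/base.py | _normalize_combination
-- ===== SOURCE A (Python) =====
-- from typing import Any, Dict, Iterable, List, Optional, Sequence, Tuple
--
-- Combination = Tuple[Tuple[str, Any], ...]
--
-- def _normalize_combination(
--     combination: Sequence[Tuple[str, Any]]
-- ) -> Optional[Combination]:
--     seen: Dict[str, Any] = {}
--     for attribute, value in combination:
--         if attribute in seen and seen[attribute] != value:
--             return None
--         seen[attribute] = value
--     ordered = tuple(sorted(seen.items(), key=lambda item: item[0]))
--     return ordered
-- ===== SOURCE B (Python) =====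
-- def _normalize_combination(combination):
--     pairs = sorted(combination, key=lambda p: p[0])
--     result = []
--     prev = None
--     for attribute, value in pairs:
--         if prev is not None and attribute == prev[0]:
--             if value != prev[1]:
--                 return None
--         else:
--             result.append((attribute, value))
--         prev = (attribute, value)
--     return tuple(result)
-- ===== Notes on version B (the rewrite author's own statement) =====
-- stated objective: alternative
-- what changed: Replaces the dict-based dedup-then-sort with a stable sort by attribute followed by a single adjacent-pair scan that detects conflicting values and keeps the first entry of each attribute group.
import Mathlib
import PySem

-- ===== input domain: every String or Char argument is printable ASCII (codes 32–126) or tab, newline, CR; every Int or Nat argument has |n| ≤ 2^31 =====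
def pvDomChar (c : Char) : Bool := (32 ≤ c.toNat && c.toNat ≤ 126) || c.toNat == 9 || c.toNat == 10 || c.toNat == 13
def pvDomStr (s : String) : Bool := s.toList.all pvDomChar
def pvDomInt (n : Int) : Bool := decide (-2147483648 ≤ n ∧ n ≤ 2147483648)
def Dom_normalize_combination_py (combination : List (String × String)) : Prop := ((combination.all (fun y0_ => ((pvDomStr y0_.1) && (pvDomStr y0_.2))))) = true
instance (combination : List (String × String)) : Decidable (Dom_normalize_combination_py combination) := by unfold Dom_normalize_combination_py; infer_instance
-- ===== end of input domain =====

-- B replaces A's dict-based dedup-then-sort with a stable sort by attr followed by one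
-- adjacent-pair scan (alternative decomposition; same value on every input, both are total).

-- ===== PORT A =====
-- for attribute, value in combination: if attr in seen and seen[attr] != value: return None; seen[attr] = value
def pvLoopA : PySem.Dict String String → List (String × String) → Option (PySem.Dict String String)
  | seen, [] => some seen
  | seen, (attr, value) :: rest =>
    if seen.contains attr = true ∧ seen.getD attr "" ≠ value then none
    else pvLoopA (seen.insert attr value) rest

def normalize_combination_py (combination : List (String × String)) : Option (List (String × String)) :=
  match pvLoopA PySem.Dict.empty combination with
  | none => none
  | some seen => some (PySem.List.sorted seen.items (fun item => item.1) false)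

-- ===== PORT B =====
-- the scan over the sorted pairs, carrying prev and the result list
def pvScanB : (String × String) → List (String × String) → List (String × String) → Option (List (String × String))
  | _, [], result => some result
  | prev, (attr, value) :: rest, result =>
    if attr = prev.1 then
      if value ≠ prev.2 then none
      else pvScanB (attr, value) rest result
    else pvScanB (attr, value) rest (result ++ [(attr, value)])

def normalize_combination_py_alt (combination : List (String × String)) : Option (List (String × String)) :=
  match PySem.List.sorted combination (fun p => p.1) false with
  | [] => some []
  | p :: rest => pvScanB p rest [p]

-- ===== PRECONDITION & SPEC =====
def Spec_normalize_combination_py (combination : List (String × String)) (out : Option (List (String × String))) : Prop := out = normalize_combination_py_alt combination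
instance (combination : List (String × String)) (out : Option (List (String × String))) : Decidable (Spec_normalize_combination_py combination out) := by unfold Spec_normalize_combination_py; infer_instance

-- ===== CLAIM (what is proved, stated in full; the proofs are below) =====
def Claim_equal_normalize_combination_py : Prop := ∀ (combination : List (String × String)), Dom_normalize_combination_py combination → Spec_normalize_combination_py combination (normalize_combination_py combination)

-- ===== LEMMAS AND PROOFS =====

-- consistency: any two entries with the same attr carry the same value
def pvCons (xs : List (String × String)) : Prop :=
  ∀ p ∈ xs, ∀ q ∈ xs, p.1 = q.1 → p.2 = q.2

-- the dict entries are compatible with every upcoming pair, and the pairs are consistent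
def pvGood (d : PySem.Dict String String) (xs : List (String × String)) : Prop :=
  (∀ a v w, d.get? a = some v → (a, w) ∈ xs → w = v) ∧ pvCons xs

lemma pvLoopA_none (d : PySem.Dict String String) (xs : List (String × String))
    (h : ¬ pvGood d xs) : pvLoopA d xs = none := by
  induction xs generalizing d with
  | nil =>
    exact absurd ⟨fun a v w _ hw => absurd hw List.not_mem_nil,
      fun p hp q hq hf => absurd hp List.not_mem_nil⟩ h
  | cons x rest ih =>
    obtain ⟨a, v⟩ := x
    show (if d.contains a = true ∧ d.getD a "" ≠ v then none
          else pvLoopA (d.insert a v) rest) = none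
    by_cases hc : d.contains a = true ∧ d.getD a "" ≠ v
    · rw [if_pos hc]
    · rw [if_neg hc]
      apply ih
      intro hg
      apply h
      have hget : ∀ u, d.get? a = some u → u = v := by
        intro u hu
        have hcont : d.contains a = true := by
          rw [PySem.Dict.contains_eq_isSome_get?, hu]; rfl
        have hgd : d.getD a "" = v := by
          by_contra hne
          exact hc ⟨hcont, hne⟩
        rw [PySem.Dict.getD_eq_get?_getD, hu] at hgd
        simpa using hgd
      constructor
      · intro b u w hu hw
        rcases List.mem_cons.mp hw with heq | hw'
        · have hb : b = a := congrArg Prod.fst heq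
          have hw2 : w = v := congrArg Prod.snd heq
          rw [hw2]
          exact (hget u (hb ▸ hu)).symm
        · by_cases hba : b = a
          · subst hba
            have h1 : (d.insert b v).get? b = some v := PySem.Dict.get?_insert_self ..
            have hw3 := hg.1 b v w h1 hw'
            rw [hw3]
            exact (hget u hu).symm
          · have h1 : (d.insert a v).get? b = d.get? b :=
              PySem.Dict.get?_insert_of_ne d v hba
            exact hg.1 b u w (by rw [h1]; exact hu) hw'
      · intro p hp q hq hfst
        rcases List.mem_cons.mp hp with hp1 | hp1 <;> rcases List.mem_cons.mp hq with hq1 | hq1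
        · rw [hp1, hq1]
        · have hqa : q.1 = a := by rw [← hfst, hp1]
          have h2 : q.2 = v := hg.1 q.1 v q.2
            (by rw [hqa]; exact PySem.Dict.get?_insert_self ..) (by simpa using hq1)
          rw [hp1, h2]
        · have hpa : p.1 = a := by rw [hfst, hq1]
          have h2 : p.2 = v := hg.1 p.1 v p.2
            (by rw [hpa]; exact PySem.Dict.get?_insert_self ..) (by simpa using hp1)
          rw [hq1, h2]
        · exact hg.2 p hp1 q hq1 hfst

lemma pvLoopA_some (d : PySem.Dict String String) (xs : List (String × String))
    (h : pvGood d xs) (hnd : d.keys.Nodup) :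
    ∃ d', pvLoopA d xs = some d' ∧ d'.keys.Nodup ∧
      ∀ a v, d'.get? a = some v ↔ (d.get? a = some v ∨ (d.get? a = none ∧ (a, v) ∈ xs)) := by
  induction xs generalizing d with
  | nil => exact ⟨d, rfl, hnd, fun a v => by simp⟩
  | cons x rest ih =>
    obtain ⟨a, v⟩ := x
    have hcond : ¬ (d.contains a = true ∧ d.getD a "" ≠ v) := by
      rintro ⟨hcont, hne⟩
      rw [PySem.Dict.contains_eq_isSome_get?] at hcont
      obtain ⟨u, hu⟩ := Option.isSome_iff_exists.mp hcont
      have hvu := h.1 a u v hu (by simp)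
      rw [PySem.Dict.getD_eq_get?_getD, hu] at hne
      exact hne (by simpa using hvu.symm)
    have hgood : pvGood (d.insert a v) rest := by
      constructor
      · intro b u w hu hw
        by_cases hba : b = a
        · subst hba
          rw [PySem.Dict.get?_insert_self] at hu
          have huv : u = v := by simpa using hu.symm
          have hwv : v = w := h.2 (b, v) (by simp) (b, w) (by simp [hw]) rfl
          rw [huv, ← hwv]
        · rw [PySem.Dict.get?_insert_of_ne d v hba] at hu
          exact h.1 b u w hu (by simp [hw])
      · intro p hp q hq hfst
        exact h.2 p (by simp [hp]) q (by simp [hq]) hfst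
    obtain ⟨d', hd', hnd', hiff⟩ := ih (d.insert a v) hgood (PySem.Dict.nodup_keys_insert d a v hnd)
    refine ⟨d', ?_, hnd', ?_⟩
    · show (if d.contains a = true ∧ d.getD a "" ≠ v then none
            else pvLoopA (d.insert a v) rest) = some d'
      rw [if_neg hcond]
      exact hd'
    · intro b u
      rw [hiff b u]
      by_cases hba : b = a
      · subst hba
        have hself : (d.insert b v).get? b = some v := PySem.Dict.get?_insert_self ..
        constructor
        · rintro (hl | ⟨hnone, _⟩)
          · have huv : u = v := by rw [hself] at hl; simpa using hl.symm
            cases hd : d.get? b with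
            | none => exact Or.inr ⟨rfl, by simp [huv]⟩
            | some w =>
              have hvw := h.1 b w v hd (by simp)
              exact Or.inl (by rw [huv, hvw])
          · rw [hself] at hnone; simp at hnone
        · rintro (hl | ⟨hnone, hmem⟩)
          · have hvu := h.1 b u v hl (by simp)
            exact Or.inl (by rw [hself, hvu])
          · rcases List.mem_cons.mp hmem with heq | hmem
            · have huv : u = v := congrArg Prod.snd heq
              exact Or.inl (by rw [hself, huv])
            · have hvu : v = u := h.2 (b, v) (by simp) (b, u) (by simp [hmem]) rfl
              exact Or.inl (by rw [hself, hvu])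
      · rw [PySem.Dict.get?_insert_of_ne d v hba]
        simp [Prod.ext_iff, hba]

-- the result list B's scan produces (proof-side description)
def pvDedup : (String × String) → List (String × String) → List (String × String)
  | _, [] => []
  | prev, (a, v) :: t => if a = prev.1 then pvDedup (a, v) t else (a, v) :: pvDedup (a, v) t

-- the adjacent-pair condition B's scan checks
def pvOK : (String × String) → List (String × String) → Bool
  | _, [] => true
  | prev, (a, v) :: t => (!decide (a = prev.1) || decide (v = prev.2)) && pvOK (a, v) t

lemma pvScanB_eq (t : List (String × String)) (prev : String × String) (acc : List (String × String)) :
    pvScanB prev t acc = if pvOK prev t = true then some (acc ++ pvDedup prev t) else none := by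
  induction t generalizing prev acc with
  | nil => simp [pvScanB, pvOK, pvDedup]
  | cons x t ih =>
    obtain ⟨a, v⟩ := x
    simp only [pvScanB, pvOK, pvDedup]
    by_cases h1 : a = prev.1
    · by_cases h2 : v = prev.2
      · simp [h1, h2, ih]
      · simp [h1, h2]
    · simp [h1, ih]

lemma pvOK_of_cons (t : List (String × String)) (p : String × String)
    (h : pvCons (p :: t)) : pvOK p t = true := by
  induction t generalizing p with
  | nil => simp [pvOK]
  | cons x t ih =>
    obtain ⟨a, v⟩ := x
    simp only [pvOK, Bool.and_eq_true, Bool.or_eq_true, Bool.not_eq_true',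
      decide_eq_true_eq, decide_eq_false_iff_not]
    refine ⟨?_, ih (a, v) ?_⟩
    · by_cases ha : a = p.1
      · exact Or.inr (h (a, v) (by simp) p (by simp) ha)
      · exact Or.inl ha
    · intro r hr s hs hfst
      exact h r (by simp at hr ⊢; tauto) s (by simp at hs ⊢; tauto) hfst

lemma pvOK_head (t : List (String × String)) (p : String × String)
    (hs : (p :: t).Pairwise (fun x y => x.1 ≤ y.1)) (hok : pvOK p t = true) :
    ∀ q ∈ t, q.1 = p.1 → q.2 = p.2 := by
  induction t generalizing p with
  | nil => simp
  | cons x t ih =>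
    obtain ⟨a, v⟩ := x
    simp only [pvOK, Bool.and_eq_true, Bool.or_eq_true, Bool.not_eq_true',
      decide_eq_true_eq, decide_eq_false_iff_not] at hok
    intro q hq hfst
    rcases List.mem_cons.mp hq with rfl | hq
    · rcases hok.1 with h | h
      · exact absurd hfst h
      · exact h
    · -- q ∈ t; first show a.1 = p.1 is forced: p.1 ≤ a ≤ q.1 = p.1
      have hle1 : p.1 ≤ a := (List.pairwise_cons.mp hs).1 (a, v) (by simp)
      have hle2 : (a, v).1 ≤ q.1 :=
        (List.pairwise_cons.mp (List.pairwise_cons.mp hs).2).1 q hq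
      have ha : a = p.1 := le_antisymm (by simpa [hfst] using hle2) hle1
      have hv : v = p.2 := by
        rcases hok.1 with h | h
        · exact absurd ha h
        · exact h
      have := ih (a, v) (List.Pairwise.tail hs) hok.2 q hq (by simpa [hfst] using ha.symm)
      simpa [hv] using this

lemma pvCons_of_OK (t : List (String × String)) (p : String × String)
    (hs : (p :: t).Pairwise (fun x y => x.1 ≤ y.1)) (hok : pvOK p t = true) :
    pvCons (p :: t) := by
  induction t generalizing p with
  | nil =>
    intro r hr s hs hfst
    simp at hr hs; subst hr; subst hs; rfl
  | cons x t ih =>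
    have hhead := pvOK_head (x :: t) p hs hok
    simp only [pvOK, Bool.and_eq_true] at hok
    have htail := ih x (List.Pairwise.tail hs) hok.2
    intro r hr s2 hs2 hfst
    rcases List.mem_cons.mp hr with hr1 | hr1 <;> rcases List.mem_cons.mp hs2 with hs1 | hs1
    · rw [hr1, hs1]
    · rw [hr1]; exact (hhead s2 hs1 (by rw [← hfst, hr1])).symm
    · rw [hs1]; exact hhead r hr1 (by rw [hfst, hs1])
    · exact htail r hr1 s2 hs1 hfst

lemma mem_pvDedup_sub (t : List (String × String)) (p q : String × String)
    (h : q ∈ pvDedup p t) : q ∈ t := by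
  induction t generalizing p with
  | nil => simp [pvDedup] at h
  | cons x t ih =>
    obtain ⟨a, v⟩ := x
    simp only [pvDedup] at h
    by_cases h1 : a = p.1
    · rw [if_pos h1] at h
      exact List.mem_cons_of_mem _ (ih (a, v) h)
    · rw [if_neg h1] at h
      rcases List.mem_cons.mp h with rfl | h
      · simp
      · exact List.mem_cons_of_mem _ (ih (a, v) h)

lemma pvDedup_keys (t : List (String × String)) (p : String × String) (a : String)
    (h : a ∈ (p :: t).map Prod.fst) : ∃ v, (a, v) ∈ p :: pvDedup p t := by
  induction t generalizing p with
  | nil =>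
    simp at h
    exact ⟨p.2, by simp [h]⟩
  | cons x t ih =>
    obtain ⟨b, w⟩ := x
    by_cases hap : a = p.1
    · exact ⟨p.2, by simp [hap]⟩
    · have h' : a ∈ ((b, w) :: t).map Prod.fst := by
        simp at h ⊢; tauto
      obtain ⟨v, hv⟩ := ih (b, w) h'
      simp only [pvDedup]
      by_cases h1 : b = p.1
      · rcases List.mem_cons.mp hv with heq | hv
        · exact absurd (congrArg Prod.fst heq) (by simpa [h1] using hap)
        · exact ⟨v, by rw [if_pos h1]; exact List.mem_cons_of_mem _ hv⟩
      · exact ⟨v, List.mem_cons_of_mem _ (by rw [if_neg h1]; exact hv)⟩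

lemma pvDedup_head_lt (t : List (String × String)) (p : String × String)
    (hs : (p :: t).Pairwise (fun x y => x.1 ≤ y.1)) :
    ∀ q ∈ pvDedup p t, p.1 < q.1 := by
  induction t generalizing p with
  | nil => simp [pvDedup]
  | cons x t ih =>
    obtain ⟨b, w⟩ := x
    intro q hq
    have hle : p.1 ≤ b := (List.pairwise_cons.mp hs).1 (b, w) (by simp)
    simp only [pvDedup] at hq
    by_cases h1 : b = p.1
    · rw [if_pos h1] at hq
      have := ih (b, w) (List.Pairwise.tail hs) q hq
      simpa [h1] using this
    · simp only [if_neg h1] at hq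
      have hlt : p.1 < b := lt_of_le_of_ne hle (Ne.symm h1)
      rcases List.mem_cons.mp hq with rfl | hq
      · exact hlt
      · exact lt_trans hlt (ih (b, w) (List.Pairwise.tail hs) q hq)

lemma pvDedup_pairwise (t : List (String × String)) (p : String × String)
    (hs : (p :: t).Pairwise (fun x y => x.1 ≤ y.1)) :
    (p :: pvDedup p t).Pairwise (fun x y => x.1 < y.1) := by
  induction t generalizing p with
  | nil => simp [pvDedup]
  | cons x t ih =>
    obtain ⟨b, w⟩ := x
    simp only [pvDedup]
    by_cases h1 : b = p.1
    · rw [if_pos h1]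
      have htail := ih (b, w) (List.Pairwise.tail hs)
      refine List.pairwise_cons.mpr ⟨?_, (List.pairwise_cons.mp htail).2⟩
      intro q hq
      have := pvDedup_head_lt t (b, w) (List.Pairwise.tail hs) q hq
      simpa [h1] using this
    · rw [if_neg h1]
      have hle : p.1 ≤ b := (List.pairwise_cons.mp hs).1 (b, w) (by simp)
      have hlt : p.1 < b := lt_of_le_of_ne hle (Ne.symm h1)
      have htail := ih (b, w) (List.Pairwise.tail hs)
      refine List.pairwise_cons.mpr ⟨?_, htail⟩
      intro q hq
      rcases List.mem_cons.mp hq with rfl | hq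
      · exact hlt
      · exact lt_trans hlt (pvDedup_head_lt t (b, w) (List.Pairwise.tail hs) q hq)

lemma pvCons_sorted_iff (xs : List (String × String)) :
    pvCons (PySem.List.sorted xs (fun p => p.1) false) ↔ pvCons xs := by
  constructor <;> intro h r hr s hs hfst
  · exact h r ((PySem.List.mem_sorted _ _ _ _).mpr hr) s ((PySem.List.mem_sorted _ _ _ _).mpr hs) hfst
  · exact h r ((PySem.List.mem_sorted _ _ _ _).mp hr) s ((PySem.List.mem_sorted _ _ _ _).mp hs) hfst

-- ===== VERDICT (by name: the statement is the Claim_ definition above) =====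
theorem normalize_combination_py_spec : Claim_equal_normalize_combination_py := by
  unfold Claim_equal_normalize_combination_py
  intro xs _
  unfold Spec_normalize_combination_py normalize_combination_py normalize_combination_py_alt
  by_cases hcons : pvCons xs
  · have hgood : pvGood PySem.Dict.empty xs :=
      ⟨fun a v w hu _ => by rw [PySem.Dict.get?_empty] at hu; exact absurd hu (by simp), hcons⟩
    obtain ⟨d', hd', hnd', hiff⟩ := pvLoopA_some _ _ hgood PySem.Dict.nodup_keys_empty
    rw [hd']
    dsimp only
    have hiff' : ∀ a v, d'.get? a = some v ↔ (a, v) ∈ xs := by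
      intro a v; rw [hiff a v]; simp [PySem.Dict.get?_empty]
    have hitems : ∀ q : String × String, q ∈ d'.items ↔ q ∈ xs := by
      intro q
      obtain ⟨a, v⟩ := q
      rw [← PySem.Dict.get?_eq_some_iff_mem_items d' a v hnd', hiff' a v]
    cases hs : PySem.List.sorted xs (fun p => p.1) false with
    | nil =>
      have hxs : xs = [] := (PySem.List.sorted_eq_nil_iff _ _ _).mp hs
      subst hxs
      have hempty : d'.items = [] :=
        List.eq_nil_iff_forall_not_mem.mpr (fun q hq => absurd ((hitems q).mp hq) List.not_mem_nil)
      dsimp only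
      rw [hempty]
      rfl
    | cons p t =>
      have hsp : (p :: t).Pairwise (fun x y : String × String => x.1 ≤ y.1) := by
        rw [← hs]; exact PySem.List.sorted_pairwise xs (fun p => p.1)
      have hconss : pvCons (p :: t) := by
        rw [← hs]; exact (pvCons_sorted_iff xs).mpr hcons
      have hok := pvOK_of_cons t p hconss
      dsimp only
      rw [pvScanB_eq, if_pos hok]
      have hBpair := pvDedup_pairwise t p hsp
      have hBmem : ∀ q : String × String, q ∈ p :: pvDedup p t ↔ q ∈ xs := by
        intro q
        constructor
        · intro hq
          have hq' : q ∈ p :: t := by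
            rcases List.mem_cons.mp hq with h1 | h1
            · simp [h1]
            · exact List.mem_cons_of_mem _ (mem_pvDedup_sub t p q h1)
          rw [← hs] at hq'
          exact (PySem.List.mem_sorted _ _ _ _).mp hq'
        · intro hq
          have hq' : q ∈ p :: t := by
            rw [← hs]; exact (PySem.List.mem_sorted _ _ _ _).mpr hq
          obtain ⟨v, hv⟩ := pvDedup_keys t p q.1 (List.mem_map_of_mem hq')
          have hvx : (q.1, v) ∈ xs := by
            have hm : (q.1, v) ∈ p :: t := by
              rcases List.mem_cons.mp hv with h1 | h1
              · simp [h1]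
              · exact List.mem_cons_of_mem _ (mem_pvDedup_sub t p _ h1)
            rw [← hs] at hm
            exact (PySem.List.mem_sorted _ _ _ _).mp hm
          have hvq : v = q.2 := hcons (q.1, v) hvx q hq rfl
          have hqeq : q = (q.1, v) := by rw [hvq]
          rw [hqeq]
          exact hv
      have hBnodup : (p :: pvDedup p t).Nodup :=
        hBpair.imp (fun hlt heq => absurd (congrArg Prod.fst heq) (ne_of_lt hlt))
      have hAnodup : d'.items.Nodup :=
        List.Nodup.of_map Prod.fst (by simpa [PySem.Dict.keys] using hnd')
      have hperm : (p :: pvDedup p t).Perm d'.items :=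
        (List.perm_ext_iff_of_nodup hBnodup hAnodup).mpr
          (fun q => (hBmem q).trans (hitems q).symm)
      rw [PySem.List.sorted_eq_of_perm_of_pairwise_lt d'.items (p :: pvDedup p t)
        (fun x => x.1) hperm hBpair]
      rfl
  · have hnone := pvLoopA_none PySem.Dict.empty xs (fun hg => hcons hg.2)
    rw [hnone]
    dsimp only
    have hxs : xs ≠ [] := by
      rintro rfl
      exact hcons (fun p hp q hq hf => absurd hp List.not_mem_nil)
    cases hs : PySem.List.sorted xs (fun p => p.1) false with
    | nil => exact absurd ((PySem.List.sorted_eq_nil_iff _ _ _).mp hs) hxs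
    | cons p t =>
      have hsp : (p :: t).Pairwise (fun x y : String × String => x.1 ≤ y.1) := by
        rw [← hs]; exact PySem.List.sorted_pairwise xs (fun p => p.1)
      have hnok : ¬ pvOK p t = true := by
        intro hok
        apply hcons
        apply (pvCons_sorted_iff xs).mp
        rw [hs]
        exact pvCons_of_OK t p hsp hok
      dsimp only
      rw [pvScanB_eq, if_neg hnok]
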